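-- pv_equiv track=rewrite | github.com/FelixRech/status-monitor | apps/vms_vm.py | format_weeks_tests
-- ===== SOURCE A (Python) =====
-- from functools import partial
--
-- def format_weeks_tests(tests):
--     """
--     Format the list of tests [(week, test), ...] into usable format for
--     generating the layout.
--
--     :param tests: a list/tuple of tests in the format [(week, test), ...]
--     :returns: a list in the format [(week, tests, ids), ...]
--     """
--     def id_helper(lists, ids, index, current_id):
--         """Generate ids for list of lists
--         :returns: a list of lists [[id1, id2, ...], [id5, ...]]"""
--         if len(lists) == 0 or index >= len(lists):
--             return ids
--         n_els = len(lists[index])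
--         c_ids = [current_id + i for i in range(n_els)]
--         n_ids = ids + [c_ids]
--         return id_helper(lists, n_ids, index + 1, current_id + n_els)
--     # Get sorted list of distinct weeks (= tests[i][0])
--     weeks = sorted(list(set(map(lambda x: x[0], tests))))
--     # Nth function will return True iff. input[0] == weeks[n]
--     fs = [partial(lambda w, x: x[0] == w, w) for w in weeks]
--     # Filter tests to list of tests for each week
--     weekly_tests = [list(map(lambda x: x[1], filter(f, tests))) for f in fs]
--     # Combine the weeks, weekly_tests and id lists
--     ids = id_helper(weekly_tests, [], 0, 0)
--     return [(weeks[i], weekly_tests[i], ids[i]) for i in range(len(weeks))]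
-- ===== SOURCE B (Python) =====
-- def format_weeks_tests(tests):
--     """Group tests by week in one pass, then emit sorted weeks with running ids."""
--     groups = {}
--     for week, test in tests:
--         groups[week] = groups.get(week, []) + [test]
--     result = []
--     next_id = 0
--     for week in sorted(groups):
--         ts = groups[week]
--         result.append((week, ts, [next_id + i for i in range(len(ts))]))
--         next_id += len(ts)
--     return result
-- ===== Notes on version B (the rewrite author's own statement) =====
-- stated objective: faster
-- what changed: Replaces the per-week filter passes over the whole list and the recursive id_helper with a single-pass dict grouping followed by one loop over the sorted weeks carrying a running id counter.
import Mathlib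
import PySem

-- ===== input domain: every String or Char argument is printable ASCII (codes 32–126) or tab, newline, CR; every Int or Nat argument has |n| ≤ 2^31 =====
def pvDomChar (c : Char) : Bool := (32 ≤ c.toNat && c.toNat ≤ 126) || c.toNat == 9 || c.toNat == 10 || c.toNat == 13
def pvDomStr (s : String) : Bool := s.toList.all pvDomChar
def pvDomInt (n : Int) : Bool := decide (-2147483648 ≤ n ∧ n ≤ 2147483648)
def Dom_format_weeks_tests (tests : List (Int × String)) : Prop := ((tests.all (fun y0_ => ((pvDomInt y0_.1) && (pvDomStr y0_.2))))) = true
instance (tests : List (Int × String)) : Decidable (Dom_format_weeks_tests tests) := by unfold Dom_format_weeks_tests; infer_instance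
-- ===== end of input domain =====

-- B replaces A's per-week filter passes and recursive id_helper with one dict-grouping pass
-- plus one counter loop over the sorted weeks (objective: faster).

-- ===== PORT A =====
-- id_helper(lists, ids, index, current_id); index is a Nat (A only ever calls it with 0, 1, 2, …)
def pvIdHelper (lists : List (List String)) (ids : List (List Int)) (index : Nat) (cur : Int) :
    List (List Int) :=
  if lists.length = 0 ∨ lists.length ≤ index then ids
  else
    let nEls := (lists.getD index []).length
    let cIds := (PySem.List.pyRange 0 nEls 1).map (fun i => cur + i)
    pvIdHelper lists (ids ++ [cIds]) (index + 1) (cur + nEls)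
termination_by lists.length - index

def format_weeks_tests (tests : List (Int × String)) : List (Int × List String × List Int) :=
  let weeks := PySem.List.sorted (PySem.Set.ofList (tests.map (·.1))) (fun x => x) false
  let weekly_tests := weeks.map (fun w => (tests.filter (fun x => x.1 == w)).map (·.2))
  let ids := pvIdHelper weekly_tests [] 0 0
  (List.range weeks.length).map (fun i =>
    (weeks.getD i 0, weekly_tests.getD i [], ids.getD i []))

-- ===== PORT B =====
def format_weeks_tests_alt (tests : List (Int × String)) : List (Int × List String × List Int) :=
  let groups : PySem.Dict Int (List String) :=
    tests.foldl (fun d p => d.insert p.1 (d.getD p.1 [] ++ [p.2])) PySem.Dict.empty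
  let st := (PySem.List.sorted groups.keys (fun x => x) false).foldl
    (fun (st : List (Int × List String × List Int) × Int) w =>
      let ts := groups.getD w []
      (st.1 ++ [(w, ts, (PySem.List.pyRange 0 ts.length 1).map (fun i => st.2 + i))],
       st.2 + (ts.length : Int)))
    ([], 0)
  st.1

-- ===== PRECONDITION & SPEC =====
def Spec_format_weeks_tests (tests : List (Int × String)) (out : List (Int × List String × List Int)) : Prop := out = format_weeks_tests_alt tests
instance (tests : List (Int × String)) (out : List (Int × List String × List Int)) : Decidable (Spec_format_weeks_tests tests out) := by unfold Spec_format_weeks_tests; infer_instance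

-- ===== CLAIM (what is proved, stated in full; the proofs are below) =====
def Claim_equal_format_weeks_tests : Prop := ∀ (tests : List (Int × String)), Dom_format_weeks_tests tests → Spec_format_weeks_tests tests (format_weeks_tests tests)

-- ===== LEMMAS AND PROOFS =====

-- the common shape: for sorted weeks ws, emit (w, g w, ids starting at c)
def pvBuild (g : Int → List String) : List Int → Int → List (Int × List String × List Int)
  | [], _ => []
  | w :: ws, c =>
      (w, g w, (PySem.List.pyRange 0 (g w).length 1).map (fun i => c + i)) ::
        pvBuild g ws (c + ((g w).length : Int))

def pvMkIds : List (List String) → Int → List (List Int)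
  | [], _ => []
  | l :: ls, c =>
      ((PySem.List.pyRange 0 l.length 1).map (fun i => c + i)) :: pvMkIds ls (c + (l.length : Int))

theorem pvGroups_getD (tests : List (Int × String)) (d : PySem.Dict Int (List String)) (w : Int) :
    (tests.foldl (fun d p => d.insert p.1 (d.getD p.1 [] ++ [p.2])) d).getD w []
      = d.getD w [] ++ ((tests.filter (fun x => x.1 == w)).map (·.2)) := by
  induction tests generalizing d with
  | nil => simp
  | cons p rest ih =>
      simp only [List.foldl_cons, List.filter_cons, ih, PySem.Dict.getD_insert]
      by_cases h : w = p.1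
      · simp [h]
      · have : (p.1 == w) = false := by simp [Ne.symm h]
        simp [this, h]

theorem pvIdHelper_eq (lists : List (List String)) (ids : List (List Int)) (index : Nat)
    (cur : Int) : pvIdHelper lists ids index cur = ids ++ pvMkIds (lists.drop index) cur := by
  fun_induction pvIdHelper lists ids index cur with
  | case1 ids index cur h =>
      have : lists.length ≤ index := by omega
      simp [List.drop_eq_nil_of_le this, pvMkIds]
  | case2 ids index cur h nEls cIds ih =>
      have hlt : index < lists.length := by omega
      have hdrop : lists.drop index = lists[index] :: lists.drop (index + 1) :=
        List.drop_eq_getElem_cons hlt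
      have hgd : lists.getD index [] = lists[index] := List.getD_eq_getElem lists [] hlt
      rw [ih, hdrop, pvMkIds, List.append_assoc, List.singleton_append]
      simp only [nEls, cIds, hgd]

theorem pvA_eq_build (g : Int → List String) (ws : List Int) (cur : Int) :
    (List.range ws.length).map (fun i =>
        (ws.getD i 0, (ws.map g).getD i [], (pvMkIds (ws.map g) cur).getD i []))
      = pvBuild g ws cur := by
  induction ws generalizing cur with
  | nil => simp [pvBuild]
  | cons w ws ih =>
      rw [List.length_cons, List.range_succ_eq_map, List.map_cons, List.map_map]
      simp only [List.map_cons, pvMkIds, pvBuild, Function.comp_def, List.getD_cons_zero,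
        List.getD_cons_succ]
      rw [ih]

theorem pvB_eq_build (G : PySem.Dict Int (List String)) (ws : List Int)
    (acc : List (Int × List String × List Int)) (cur : Int) :
    (ws.foldl
      (fun (st : List (Int × List String × List Int) × Int) w =>
        let ts := G.getD w []
        (st.1 ++ [(w, ts, (PySem.List.pyRange 0 ts.length 1).map (fun i => st.2 + i))],
         st.2 + (ts.length : Int)))
      (acc, cur)).1 = acc ++ pvBuild (fun w => G.getD w []) ws cur := by
  induction ws generalizing acc cur with
  | nil => simp [pvBuild]
  | cons w ws ih =>
      simp only [List.foldl_cons, ih, pvBuild, List.append_assoc, List.singleton_append]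

theorem pvKeys_eq (tests : List (Int × String)) :
    (tests.foldl (fun d p => d.insert p.1 (d.getD p.1 [] ++ [p.2]))
        (PySem.Dict.empty : PySem.Dict Int (List String))).keys
      = PySem.Set.ofList (tests.map (·.1)) := by
  rw [PySem.Dict.keys_foldl_insert_key]
  rfl

-- ===== VERDICT (by name: the statement is the Claim_ definition above) =====
theorem pvAlt_eq_build (tests : List (Int × String)) :
    format_weeks_tests_alt tests
      = pvBuild (fun w => (tests.filter (fun x => x.1 == w)).map (·.2))
          (PySem.List.sorted (PySem.Set.ofList (tests.map (·.1))) (fun x => x) false) 0 := by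
  unfold format_weeks_tests_alt
  simp only []
  rw [pvB_eq_build, List.nil_append, pvKeys_eq]
  have hfun : (fun w => ((tests.foldl (fun d p => d.insert p.1 (d.getD p.1 [] ++ [p.2]))
      (PySem.Dict.empty : PySem.Dict Int (List String))).getD w []))
        = fun w => (tests.filter (fun x => x.1 == w)).map (·.2) := by
    funext w
    rw [pvGroups_getD]
    rfl
  rw [hfun]

theorem pvA_eq_build' (tests : List (Int × String)) :
    format_weeks_tests tests
      = pvBuild (fun w => (tests.filter (fun x => x.1 == w)).map (·.2))
          (PySem.List.sorted (PySem.Set.ofList (tests.map (·.1))) (fun x => x) false) 0 := by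
  unfold format_weeks_tests
  simp only []
  rw [pvIdHelper_eq, List.drop_zero, List.nil_append, pvA_eq_build]

theorem format_weeks_tests_spec : Claim_equal_format_weeks_tests := by
  intro tests _
  unfold Spec_format_weeks_tests
  rw [pvA_eq_build', pvAlt_eq_build]
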